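-- pv_equiv track=rewrite | github.com/hevi9/lss | lss/__init__.py | init_indicators
-- ===== SOURCE A (Python) =====
-- default_indicators = {
--     "lc": ("\033[", "lc: Left of color sequence"),
--     "rc": ("m", "rc: Right of color sequence"),
--     "ec": ("0", "ec: End color (replaces lc+rs+rc)"),
--     "rs": ("0", "rs: Reset to ordinary colors"),
--     "no": ("0", "no: Normal"),
--     "fi": ("0", "fi: File: default"),
--     "di": ("01;34", "di: Directory: bright blue"),
--     "ln": ("01;36", "ln: Symlink: bright cyan"),
--     "pi": ("33", "pi: Pipe: yellow/brown"),
--     "so": ("01;35", "so: Socket: bright magenta"),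
--     "bd": ("01;33", "bd: Block device: bright yellow"),
--     "cd": ("01;33", "cd: Char device: bright yellow"),
--     "mi": ("0", "mi: Missing file: undefined"),
--     "or": ("0", "or: Orphaned symlink: undefined"),
--     "ex": ("01;32", "ex: Executable: bright green"),
--     "do": ("01;35", "do: Door: bright magenta"),
--     "su": ("37;41", "su: setuid: white on red"),
--     "sg": ("30;43", "sg: setgid: black on yellow"),
--     "st": ("37;44", "st: sticky: black on blue"),
--     "ow": ("34;42", "ow: other-writable: blue on green"),
--     "tw": ("30;42", "tw: ow w/ sticky: black on green"),
--     "ca": ("30;41", "ca: black on red"),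
--     "mh": ("0", "mh: disabled by default"),
--     "cl": ("\033[K", "cl: clear to end of line")
-- }
--
-- def init_indicators(ls_colors_text):
--     data = {k: v for k, v in
--             [i.split('=') for i in ls_colors_text.split(':') if i]}
--     indicators = {k: data[k] if k in data else v[0] for k, v
--                   in default_indicators.items()}
--     for k in indicators:
--         if k in data:
--             del data[k]
--     return indicators, data
-- ===== SOURCE B (Python) =====
-- default_indicators = {
--     "lc": ("\033[", "lc: Left of color sequence"),
--     "rc": ("m", "rc: Right of color sequence"),
--     "ec": ("0", "ec: End color (replaces lc+rs+rc)"),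
--     "rs": ("0", "rs: Reset to ordinary colors"),
--     "no": ("0", "no: Normal"),
--     "fi": ("0", "fi: File: default"),
--     "di": ("01;34", "di: Directory: bright blue"),
--     "ln": ("01;36", "ln: Symlink: bright cyan"),
--     "pi": ("33", "pi: Pipe: yellow/brown"),
--     "so": ("01;35", "so: Socket: bright magenta"),
--     "bd": ("01;33", "bd: Block device: bright yellow"),
--     "cd": ("01;33", "cd: Char device: bright yellow"),
--     "mi": ("0", "mi: Missing file: undefined"),
--     "or": ("0", "or: Orphaned symlink: undefined"),
--     "ex": ("01;32", "ex: Executable: bright green"),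
--     "do": ("01;35", "do: Door: bright magenta"),
--     "su": ("37;41", "su: setuid: white on red"),
--     "sg": ("30;43", "sg: setgid: black on yellow"),
--     "st": ("37;44", "st: sticky: black on blue"),
--     "ow": ("34;42", "ow: other-writable: blue on green"),
--     "tw": ("30;42", "tw: ow w/ sticky: black on green"),
--     "ca": ("30;41", "ca: black on red"),
--     "mh": ("0", "mh: disabled by default"),
--     "cl": ("\033[K", "cl: clear to end of line")
-- }
--
-- def init_indicators(ls_colors_text):
--     indicators = {k: v[0] for k, v in default_indicators.items()}
--     extras = {}
--     for item in ls_colors_text.split(':'):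
--         if not item:
--             continue
--         k, val = item.split('=')
--         if k in default_indicators:
--             indicators[k] = val
--         else:
--             extras[k] = val
--     return indicators, extras
-- ===== Notes on version B (the rewrite author's own statement) =====
-- stated objective: simpler
-- what changed: One classifying pass over the split items that writes directly into a pre-seeded indicators dict or an extras dict, instead of building a full data dict, rebuilding indicators from defaults, and then deleting default keys out of data.
import Mathlib
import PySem

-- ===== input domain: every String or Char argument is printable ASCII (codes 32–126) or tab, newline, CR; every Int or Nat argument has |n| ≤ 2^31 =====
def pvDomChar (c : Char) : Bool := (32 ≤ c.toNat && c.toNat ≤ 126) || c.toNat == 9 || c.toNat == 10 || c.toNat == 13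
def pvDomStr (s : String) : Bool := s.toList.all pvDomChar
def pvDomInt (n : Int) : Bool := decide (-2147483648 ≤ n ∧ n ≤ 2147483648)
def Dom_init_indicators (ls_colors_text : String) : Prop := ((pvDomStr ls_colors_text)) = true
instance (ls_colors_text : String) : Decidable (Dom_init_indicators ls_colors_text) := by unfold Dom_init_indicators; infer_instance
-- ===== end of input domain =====

-- B replaces A's build-full-dict / rebuild-indicators / delete-defaults pipeline by one classifying
-- pass that writes each item into a pre-seeded indicators dict or an extras dict (objective: simpler).

-- s.split(sep) for a NONEMPTY literal sep: PySem.Str.split? is some there, so getD [] is exact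
def pvSplit (s sep : String) : List String := (PySem.Str.split? s sep).getD []

-- module-level constant default_indicators (insertion order of the Python literal)
def pvDefaults : List (String × String × String) := [
  ("lc", "\x1b[", "lc: Left of color sequence"),
  ("rc", "m", "rc: Right of color sequence"),
  ("ec", "0", "ec: End color (replaces lc+rs+rc)"),
  ("rs", "0", "rs: Reset to ordinary colors"),
  ("no", "0", "no: Normal"),
  ("fi", "0", "fi: File: default"),
  ("di", "01;34", "di: Directory: bright blue"),
  ("ln", "01;36", "ln: Symlink: bright cyan"),
  ("pi", "33", "pi: Pipe: yellow/brown"),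
  ("so", "01;35", "so: Socket: bright magenta"),
  ("bd", "01;33", "bd: Block device: bright yellow"),
  ("cd", "01;33", "cd: Char device: bright yellow"),
  ("mi", "0", "mi: Missing file: undefined"),
  ("or", "0", "or: Orphaned symlink: undefined"),
  ("ex", "01;32", "ex: Executable: bright green"),
  ("do", "01;35", "do: Door: bright magenta"),
  ("su", "37;41", "su: setuid: white on red"),
  ("sg", "30;43", "sg: setgid: black on yellow"),
  ("st", "37;44", "st: sticky: black on blue"),
  ("ow", "34;42", "ow: other-writable: blue on green"),
  ("tw", "30;42", "tw: ow w/ sticky: black on green"),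
  ("ca", "30;41", "ca: black on red"),
  ("mh", "0", "mh: disabled by default"),
  ("cl", "\x1b[K", "cl: clear to end of line")]

-- ===== PORT A =====
-- [i.split('=') for i in ls_colors_text.split(':') if i]
def pvParseA (ls_colors_text : String) : List (List String) :=
  ((pvSplit ls_colors_text ":").filter (fun i => i != "")).map
    (fun i => pvSplit i "=")

-- data = {k: v for k, v in …}   (the non-[k,v] branch is where Python raises ValueError; excluded by Pre_)
def pvDataA (ls_colors_text : String) : PySem.Dict String String :=
  (pvParseA ls_colors_text).foldl
    (fun d kv => match kv with | [k, v] => d.insert k v | _ => d) PySem.Dict.empty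

-- indicators = {k: data[k] if k in data else v[0] for k, v in default_indicators.items()}
def pvIndA (ls_colors_text : String) : PySem.Dict String String :=
  pvDefaults.foldl
    (fun ind kv => ind.insert kv.1
      (if (pvDataA ls_colors_text).contains kv.1 then
        ((pvDataA ls_colors_text).get? kv.1).getD kv.2.1 else kv.2.1))
    PySem.Dict.empty

def init_indicators (ls_colors_text : String) : (List (String × String)) × (List (String × String)) :=
  -- for k in indicators: if k in data: del data[k]
  ((pvIndA ls_colors_text).items,
   ((pvIndA ls_colors_text).keys.foldl
     (fun d k => if d.contains k then d.erase k else d) (pvDataA ls_colors_text)).items)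

-- ===== PORT B =====
-- indicators = {k: v[0] for k, v in default_indicators.items()}
def pvInd0 : PySem.Dict String String :=
  pvDefaults.foldl (fun ind kv => ind.insert kv.1 kv.2.1) PySem.Dict.empty

-- loop body: skip falsy item; k, val = item.split('='); classify into indicators / extras
def pvStepB (st : PySem.Dict String String × PySem.Dict String String) (item : String) :
    PySem.Dict String String × PySem.Dict String String :=
  if item = "" then st else
  match pvSplit item "=" with
  | [k, v] =>
      if (PySem.Dict.mk pvDefaults).contains k then (st.1.insert k v, st.2)
      else (st.1, st.2.insert k v)
  | _ => st   -- Python raises ValueError here; excluded by Pre_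

def pvStB (ls_colors_text : String) : PySem.Dict String String × PySem.Dict String String :=
  (pvSplit ls_colors_text ":").foldl pvStepB (pvInd0, PySem.Dict.empty)

def init_indicators_alt (ls_colors_text : String) : (List (String × String)) × (List (String × String)) :=
  ((pvStB ls_colors_text).1.items, (pvStB ls_colors_text).2.items)

-- ===== PRECONDITION & SPEC =====
-- Pre_ excludes exactly the inputs on which Python A raises ValueError: a nonempty ':'-item whose
-- '='-split does not have exactly two parts (no '=' or more than one '=') fails tuple unpacking.
def Pre_init_indicators (ls_colors_text : String) : Prop :=
  ∀ i ∈ pvSplit ls_colors_text ":", i ≠ "" → (pvSplit i "=").length = 2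
instance (ls_colors_text : String) : Decidable (Pre_init_indicators ls_colors_text) := by
  unfold Pre_init_indicators; infer_instance

def pvWitness_init_indicators : String := "di=01;32:*.md=00;32:ln=target"

def Spec_init_indicators (ls_colors_text : String) (out : (List (String × String)) × (List (String × String))) : Prop := out = init_indicators_alt ls_colors_text
instance (ls_colors_text : String) (out : (List (String × String)) × (List (String × String))) : Decidable (Spec_init_indicators ls_colors_text out) := by unfold Spec_init_indicators; infer_instance

-- ===== CLAIM (what is proved, stated in full; the proofs are below) =====
def Claim_equal_init_indicators : Prop := ∀ (ls_colors_text : String), Dom_init_indicators ls_colors_text → Pre_init_indicators ls_colors_text → Spec_init_indicators ls_colors_text (init_indicators ls_colors_text)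

-- ===== LEMMAS AND PROOFS =====

-- key-only predicate: the entry survives into extras
def pvPredK (k : String) : Bool := !((PySem.Dict.mk pvDefaults).contains k)

-- the well-formed items, as key/value pairs
def pvToPairs (L : List String) : List (String × String) :=
  L.filterMap (fun i =>
    if i = "" then none else
    match pvSplit i "=" with
    | [k, v] => some (k, v)
    | _ => none)

theorem pvBridgeA (L : List String) (d : PySem.Dict String String)
    (h : ∀ i ∈ L, i ≠ "" → (pvSplit i "=").length = 2) :
    ((L.filter (fun i => i != "")).map (fun i => pvSplit i "=")).foldl
      (fun d kv => match kv with | [k, v] => d.insert k v | _ => d) d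
    = (pvToPairs L).foldl (fun d p => d.insert p.1 p.2) d := by
  induction L generalizing d with
  | nil => simp [pvToPairs]
  | cons i L ih =>
    by_cases hi : i = ""
    · simpa [pvToPairs, hi] using ih d (fun j hj => h j (List.mem_cons_of_mem _ hj))
    · have h2 := h i (List.mem_cons_self) hi
      rcases hsp : pvSplit i "=" with _ | ⟨a, _ | ⟨b, _ | _⟩⟩ <;>
        simp [hsp] at h2 <;>
        simpa [pvToPairs, hi, hsp] using ih _ (fun j hj => h j (List.mem_cons_of_mem _ hj))

theorem pvBridgeB (L : List String) (st : PySem.Dict String String × PySem.Dict String String)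
    (h : ∀ i ∈ L, i ≠ "" → (pvSplit i "=").length = 2) :
    L.foldl pvStepB st
    = (pvToPairs L).foldl
        (fun st p => if (PySem.Dict.mk pvDefaults).contains p.1
                     then (st.1.insert p.1 p.2, st.2) else (st.1, st.2.insert p.1 p.2)) st := by
  induction L generalizing st with
  | nil => simp [pvToPairs]
  | cons i L ih =>
    by_cases hi : i = ""
    · simpa [pvToPairs, hi, pvStepB] using ih st (fun j hj => h j (List.mem_cons_of_mem _ hj))
    · have h2 := h i (List.mem_cons_self) hi
      rcases hsp : pvSplit i "=" with _ | ⟨a, _ | ⟨b, _ | _⟩⟩ <;>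
        simp [hsp] at h2 <;>
        simpa [pvToPairs, hi, hsp, pvStepB] using
          ih _ (fun j hj => h j (List.mem_cons_of_mem _ hj))

theorem pvFilterUpd (l : List (String × String)) (k v : String) (hk : pvPredK k = false) :
    (l.map (fun q => if q.1 == k then (k, v) else q)).filter (fun p => pvPredK p.1)
    = l.filter (fun p => pvPredK p.1) := by
  induction l with
  | nil => rfl
  | cons q l ih =>
    have hqp : pvPredK ((if (q.1 == k) = true then (k, v) else q).1) = pvPredK q.1 := by
      by_cases hq : q.1 = k <;> simp [hq]
    rw [List.map_cons, List.filter_cons, List.filter_cons, hqp, ih]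
    by_cases hp : pvPredK q.1 = true
    · have hq : q.1 ≠ k := fun h => by rw [h] at hp; simp [hk] at hp
      simp [hp, hq]
    · simp [hp]

-- invariant of the classifying pass against A's data dict
theorem pvInv (pairs : List (String × String)) (d I E : PySem.Dict String String)
    (hI : I.items = pvDefaults.map (fun kv => (kv.1, (d.get? kv.1).getD kv.2.1)))
    (hE : E.items = d.items.filter (fun p => pvPredK p.1))
    (hnd : d.keys.Nodup) :
    (pairs.foldl
        (fun st p => if (PySem.Dict.mk pvDefaults).contains p.1
                     then (st.1.insert p.1 p.2, st.2) else (st.1, st.2.insert p.1 p.2)) (I, E)).1.items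
      = pvDefaults.map (fun kv =>
          (kv.1, ((pairs.foldl (fun d p => d.insert p.1 p.2) d).get? kv.1).getD kv.2.1))
    ∧ (pairs.foldl
        (fun st p => if (PySem.Dict.mk pvDefaults).contains p.1
                     then (st.1.insert p.1 p.2, st.2) else (st.1, st.2.insert p.1 p.2)) (I, E)).2.items
      = (pairs.foldl (fun d p => d.insert p.1 p.2) d).items.filter (fun p => pvPredK p.1) := by
  induction pairs generalizing d I E with
  | nil => exact ⟨hI, hE⟩
  | cons p pairs ih =>
    by_cases hc : (PySem.Dict.mk pvDefaults).contains p.1 = true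
    · -- default key: goes to indicators on the B side, into data on the A side
      have hIc : I.contains p.1 = true := by
        rw [PySem.Dict.contains_mk] at hc
        simpa [PySem.Dict.contains, hI, List.any_map] using hc
      have hI' : (I.insert p.1 p.2).items
          = pvDefaults.map (fun kv => (kv.1, ((d.insert p.1 p.2).get? kv.1).getD kv.2.1)) := by
        rw [PySem.Dict.items_insert_of_contains _ _ hIc, hI, List.map_map]
        refine List.map_congr_left (fun kv _ => ?_)
        by_cases hkv : kv.1 = p.1
        · simp [hkv, PySem.Dict.get?_insert_self]
        · rw [PySem.Dict.get?_insert_of_ne _ _ hkv]; simp [hkv]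
      have hkfalse : pvPredK p.1 = false := by simp [pvPredK, hc]
      have hE' : E.items = (d.insert p.1 p.2).items.filter (fun q => pvPredK q.1) := by
        by_cases hd : d.contains p.1 = true
        · rw [PySem.Dict.items_insert_of_contains _ _ hd, pvFilterUpd _ _ _ hkfalse, hE]
        · rw [PySem.Dict.items_insert_of_not_contains _ _ (Bool.eq_false_iff.mpr hd)]
          simp [List.filter_append, hkfalse, hE]
      simp only [List.foldl_cons, if_pos hc]
      exact ih (d.insert p.1 p.2) (I.insert p.1 p.2) E hI' hE'
        (PySem.Dict.nodup_keys_insert _ _ _ hnd)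
    · -- non-default key: goes to extras on the B side
      have hc' : (PySem.Dict.mk pvDefaults).contains p.1 = false := Bool.eq_false_iff.mpr hc
      have hne : ∀ kv ∈ pvDefaults, kv.1 ≠ p.1 := by
        intro kv hkv heq
        rw [PySem.Dict.contains_mk] at hc'
        have : pvDefaults.any (fun q => q.1 == p.1) = true :=
          List.any_eq_true.mpr ⟨kv, hkv, by simp [heq]⟩
        simp [this] at hc'
      have hI' : I.items
          = pvDefaults.map (fun kv => (kv.1, ((d.insert p.1 p.2).get? kv.1).getD kv.2.1)) := by
        rw [hI]
        exact List.map_congr_left (fun kv hkv => by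
          rw [PySem.Dict.get?_insert_of_ne _ _ (hne kv hkv)])
      have hktrue : pvPredK p.1 = true := by simp [pvPredK, hc']
      have hE' : (E.insert p.1 p.2).items
          = (d.insert p.1 p.2).items.filter (fun q => pvPredK q.1) := by
        by_cases hd : d.contains p.1 = true
        · have hEc : E.contains p.1 = true := by
            simp only [PySem.Dict.contains, List.any_eq_true] at hd ⊢
            obtain ⟨q, hq, hq1⟩ := hd
            refine ⟨q, ?_, hq1⟩
            rw [hE, List.mem_filter]
            have hq1' : q.1 = p.1 := by simpa using hq1
            exact ⟨hq, by rw [hq1']; exact hktrue⟩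
          rw [PySem.Dict.items_insert_of_contains _ _ hEc,
              PySem.Dict.items_insert_of_contains _ _ hd, hE, List.filter_map]
          congr 1
          refine List.filter_congr (fun q _ => ?_)
          by_cases hq : q.1 = p.1 <;> simp [hq]
        · have hd' : d.contains p.1 = false := Bool.eq_false_iff.mpr hd
          have hEc : E.contains p.1 = false := by
            simp only [PySem.Dict.contains, List.any_eq_false] at hd' ⊢
            intro q hq
            exact hd' q (List.mem_of_mem_filter (hE ▸ hq))
          rw [PySem.Dict.items_insert_of_not_contains _ _ hEc,
              PySem.Dict.items_insert_of_not_contains _ _ hd', hE]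
          simp [List.filter_append, hktrue]
      simp only [List.foldl_cons, if_neg hc]
      exact ih (d.insert p.1 p.2) I (E.insert p.1 p.2) hI' hE'
        (PySem.Dict.nodup_keys_insert _ _ _ hnd)

-- A's erase loop leaves exactly the entries whose key is not among ks
theorem pvEraseFold (ks : List String) (d : PySem.Dict String String) :
    (ks.foldl (fun d k => if d.contains k then d.erase k else d) d).items
    = d.items.filter (fun p => !(ks.contains p.1)) := by
  induction ks generalizing d with
  | nil => simp
  | cons k ks ih =>
    have hstep : (if d.contains k then d.erase k else d).items
        = d.items.filter (fun p => !(p.1 == k)) := by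
      by_cases hd : d.contains k = true
      · simp [hd, PySem.Dict.erase]
      · have hd' : d.contains k = false := Bool.eq_false_iff.mpr hd
        rw [if_neg hd]
        simp only [PySem.Dict.contains, List.any_eq_false] at hd'
        exact (List.filter_eq_self.mpr (fun q hq => by simp [hd' q hq])).symm
    calc ((k :: ks).foldl (fun d k => if d.contains k then d.erase k else d) d).items
        = (ks.foldl (fun d k => if d.contains k then d.erase k else d)
            (PySem.Dict.mk (d.items.filter (fun p => !(p.1 == k))))).items := by
          rw [List.foldl_cons, PySem.Dict.ext hstep]
      _ = d.items.filter (fun p => !((k :: ks).contains p.1)) := by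
          rw [ih, List.filter_filter]
          refine List.filter_congr (fun q _ => ?_)
          by_cases hqk : q.1 = k
          · simp [hqk]
          · have h1 : (q.1 == k) = false := by simp [hqk]
            simp [h1]
            exact fun _ => hqk

theorem pvDefaultsKeysNodup : (pvDefaults.map (fun kv => kv.1)).Nodup := by decide

theorem pvIndAItems (t : String) :
    (pvIndA t).items
    = pvDefaults.map (fun kv => (kv.1, ((pvDataA t).get? kv.1).getD kv.2.1)) := by
  have h := PySem.Dict.items_foldl_insert_fresh pvDefaults (fun kv => kv.1)
    (fun kv => if (pvDataA t).contains kv.1 then ((pvDataA t).get? kv.1).getD kv.2.1 else kv.2.1)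
    PySem.Dict.empty (fun a _ => by simp) pvDefaultsKeysNodup
  rw [pvIndA, h]
  refine List.map_congr_left (fun kv _ => ?_)
  by_cases hc : (pvDataA t).contains kv.1 = true
  · simp [hc]
  · have : (pvDataA t).get? kv.1 = none := by
      rw [PySem.Dict.get?_eq_none_iff_contains]; exact Bool.eq_false_iff.mpr hc
    simp [hc, this]

theorem pvInd0Items :
    pvInd0.items = pvDefaults.map (fun kv => (kv.1, kv.2.1)) := by
  have h := PySem.Dict.items_foldl_insert_fresh pvDefaults (fun kv => kv.1)
    (fun kv => kv.2.1) PySem.Dict.empty (fun a _ => by simp) pvDefaultsKeysNodup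
  rw [pvInd0, h]
  rfl

theorem pvContainsMapFst (x : String) :
    ((pvDefaults.map (fun kv => kv.1)).contains x) = (PySem.Dict.mk pvDefaults).contains x := by
  rw [PySem.Dict.contains_mk, List.contains_eq_any_beq, List.any_map]
  congr 1
  funext kv
  by_cases hq : x = kv.1
  · simp [hq]
  · simp [hq, Ne.symm hq]

-- ===== VERDICT (by name: the statement is the Claim_ definition above) =====
set_option maxHeartbeats 1000000 in
theorem init_indicators_spec : Claim_equal_init_indicators := by
  intro t _hDom hPre
  unfold Spec_init_indicators init_indicators init_indicators_alt pvStB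
  have hdata : pvDataA t
      = (pvToPairs (pvSplit t ":")).foldl (fun d p => d.insert p.1 p.2)
          PySem.Dict.empty := by
    rw [pvDataA, pvParseA]; exact pvBridgeA _ _ hPre
  have hfold := pvBridgeB (pvSplit t ":") (pvInd0, PySem.Dict.empty) hPre
  have hinv := pvInv (pvToPairs (pvSplit t ":")) PySem.Dict.empty pvInd0
    PySem.Dict.empty
    (by rw [pvInd0Items]; exact List.map_congr_left (fun kv _ => by simp))
    (by rfl) (by simp)
  rw [hfold]
  simp only [Prod.mk.injEq]
  constructor
  · rw [pvIndAItems, hinv.1, hdata]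
  · have hkeys : (pvIndA t).keys = pvDefaults.map (fun kv => kv.1) := by
      simp only [PySem.Dict.keys]
      rw [pvIndAItems, List.map_map]
      rfl
    rw [hkeys, pvEraseFold, hinv.2, hdata]
    exact List.filter_congr (fun q _ => by rw [pvContainsMapFst, pvPredK])
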